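-- pv_equiv track=rewrite | github.com/LijiezZZ/ATS_PR2 | Pràctica2_ats/TextCounter.py | shuffling
-- ===== SOURCE A (Python) =====
-- def shuffling(freq_map):
--     resultat = {}
--
--     for llista in freq_map:
--         for dic in llista:
--             for key in dic.keys():
--                 if key not in resultat:
--                     resultat[key] = [1]
--                 else:
--                     resultat[key].append(1)
--     return resultat
-- ===== SOURCE B (Python) =====
-- def shuffling(freq_map):
--     # divide-and-conquer: recursively build dicts of 1-lists for halves and merge them
--     def merge(d1, d2):
--         out = dict(d1)
--         for k, v in d2.items():
--             out[k] = out.get(k, []) + v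
--         return out
--
--     def go(dics):
--         if len(dics) <= 1:
--             return {k: [1] for k in dics[0]} if dics else {}
--         mid = len(dics) // 2
--         return merge(go(dics[:mid]), go(dics[mid:]))
--
--     return go([dic for llista in freq_map for dic in llista])
-- ===== Notes on version B (the rewrite author's own statement) =====
-- stated objective: alternative
-- what changed: A builds one dict incrementally with a per-key branch-and-append inside a triple nested loop; B flattens the dicts into one list and processes it divide-and-conquer: it recursively builds the result for each half and merges the two partial dicts by concatenating their per-key 1-lists, preserving first-encounter order.
import Mathlib
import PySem

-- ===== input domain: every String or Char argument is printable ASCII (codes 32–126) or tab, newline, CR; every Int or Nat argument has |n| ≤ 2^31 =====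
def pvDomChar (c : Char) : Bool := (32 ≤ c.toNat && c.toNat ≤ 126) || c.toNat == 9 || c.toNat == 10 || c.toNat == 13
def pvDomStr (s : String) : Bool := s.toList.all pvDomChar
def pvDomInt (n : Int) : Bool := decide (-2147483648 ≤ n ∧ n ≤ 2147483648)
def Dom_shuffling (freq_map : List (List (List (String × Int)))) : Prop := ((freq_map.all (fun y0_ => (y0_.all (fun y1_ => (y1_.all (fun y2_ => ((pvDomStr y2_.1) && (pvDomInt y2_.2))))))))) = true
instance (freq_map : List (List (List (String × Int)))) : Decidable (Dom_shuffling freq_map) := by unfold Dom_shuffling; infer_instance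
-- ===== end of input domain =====

-- B replaces A's incremental branch-and-append dict building by a divide-and-conquer
-- recursion: build partial dicts for the two halves of the flattened dict list and merge
-- them by concatenating per-key 1-lists (objective: alternative).


-- ===== PORT A =====
-- a Python dict's keys() in insertion order = first occurrences of the pairs' first components
def pvKeysOf (dic : List (String × Int)) : List String :=
  PySem.List.dedup (dic.map Prod.fst)

def pvStepA (r : PySem.Dict String (List Int)) (key : String) : PySem.Dict String (List Int) :=
  if r.contains key = false then r.insert key [1]
  else r.modify key [] (fun v => v ++ [1])

def shuffling (freq_map : List (List (List (String × Int)))) : List (String × List Int) :=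
  (freq_map.foldl (fun r llista =>
    llista.foldl (fun r dic =>
      (pvKeysOf dic).foldl pvStepA r) r) PySem.Dict.empty).items

-- ===== PORT B =====
-- out = dict(d1); for k, v in d2.items(): out[k] = out.get(k, []) + v
def pvMerge (d1 d2 : PySem.Dict String (List Int)) : PySem.Dict String (List Int) :=
  d2.items.foldl (fun out p => out.insert p.1 (out.getD p.1 [] ++ p.2)) d1

def pvGo : List (List (String × Int)) → PySem.Dict String (List Int)
  | [] => PySem.Dict.empty
  | [dic] => (pvKeysOf dic).foldl (fun d k => d.insert k [1]) PySem.Dict.empty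
  | d1 :: d2 :: rest =>
      pvMerge (pvGo ((d1 :: d2 :: rest).take ((d1 :: d2 :: rest).length / 2)))
              (pvGo ((d1 :: d2 :: rest).drop ((d1 :: d2 :: rest).length / 2)))
  termination_by dics => dics.length
  decreasing_by
    · simp [List.length_take]; omega
    · simp; omega

def shuffling_alt (freq_map : List (List (List (String × Int)))) : List (String × List Int) :=
  (pvGo (freq_map.flatMap (fun llista => llista))).items

-- ===== PRECONDITION & SPEC =====
def Spec_shuffling (freq_map : List (List (List (String × Int)))) (out : List (String × List Int)) : Prop := out = shuffling_alt freq_map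
instance (freq_map : List (List (List (String × Int)))) (out : List (String × List Int)) : Decidable (Spec_shuffling freq_map out) := by unfold Spec_shuffling; infer_instance

-- ===== CLAIM (what is proved, stated in full; the proofs are below) =====
def Claim_equal_shuffling : Prop := ∀ (freq_map : List (List (List (String × Int)))), Dom_shuffling freq_map → Spec_shuffling freq_map (shuffling freq_map)

-- ===== LEMMAS AND PROOFS =====

-- the invariant both programs maintain: keys in first-encounter order of the key stream,
-- each key mapped to a list of 1's of its multiplicity
def pvInv (d : PySem.Dict String (List Int)) (ks : List String) : Prop :=
  d.keys = PySem.Set.ofList ks ∧ ∀ c, d.getD c [] = List.replicate (ks.count c) 1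

theorem pvInv_nodup {d : PySem.Dict String (List Int)} {ks : List String}
    (h : pvInv d ks) : d.keys.Nodup := by
  rw [h.1]; exact PySem.Set.nodup_ofList ks

-- two dicts satisfying the invariant for the same stream are equal as items lists
theorem pvInv_items_eq {d d' : PySem.Dict String (List Int)} {ks : List String}
    (h : pvInv d ks) (h' : pvInv d' ks) : d.items = d'.items := by
  rw [PySem.Dict.items_eq_map_keys d (pvInv_nodup h) [],
      PySem.Dict.items_eq_map_keys d' (pvInv_nodup h') [],
      h.1, h'.1]
  refine List.map_congr_left (fun k _ => ?_)
  rw [(h.2 k), (h'.2 k)]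

-- ===== A side =====

theorem pvStepA_eq_modify (r : PySem.Dict String (List Int)) (key : String) :
    pvStepA r key = r.modify key [] (fun v => v ++ [1]) := by
  unfold pvStepA
  by_cases h : r.contains key = false
  · simp only [h, if_true, PySem.Dict.modify, PySem.Dict.getD,
      (PySem.Dict.get?_eq_none_iff_contains r key).mpr h, Option.getD_none, List.nil_append]
  · simp [h]

theorem pvMap_filter_pairs (ks : List String) (c : String) :
    List.map (fun x => x.2) (List.filter (fun p => p.1 == c) (ks.map (fun k => (k, (1 : Int))))) =
      List.replicate (ks.count c) 1 := by
  induction ks with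
  | nil => simp
  | cons k t ih =>
    by_cases h : k = c
    · subst h; simp [List.replicate_succ, ih]
    · simp [h, ih, beq_iff_eq]

theorem pvA_inv (freq_map : List (List (List (String × Int)))) :
    pvInv (freq_map.foldl (fun r llista =>
        llista.foldl (fun r dic => (pvKeysOf dic).foldl pvStepA r) r) PySem.Dict.empty)
      (freq_map.flatMap (fun llista => llista.flatMap (fun dic => pvKeysOf dic))) := by
  set ks := freq_map.flatMap (fun llista => llista.flatMap (fun dic => pvKeysOf dic)) with hks
  have hA : (freq_map.foldl (fun r llista =>
      llista.foldl (fun r dic => (pvKeysOf dic).foldl pvStepA r) r) PySem.Dict.empty)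
      = ks.foldl pvStepA PySem.Dict.empty := by
    rw [hks, List.foldl_flatMap]
    exact PySem.List.foldl_congr_mem _ _ _ _ (fun r llista _ => (List.foldl_flatMap).symm)
  rw [hA]
  have hstep : ks.foldl pvStepA PySem.Dict.empty =
      (ks.map (fun k => (k, (1 : Int)))).foldl
        (fun d p => d.modify p.1 [] (fun v => v ++ [p.2])) PySem.Dict.empty := by
    rw [List.foldl_map]
    exact PySem.List.foldl_congr_mem _ _ _ _ (fun r k _ => pvStepA_eq_modify r k)
  constructor
  · rw [PySem.List.foldl_congr_mem ks pvStepA (fun d x => d.modify x [] (fun v => v ++ [1]))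
      PySem.Dict.empty (fun r k _ => pvStepA_eq_modify r k),
      PySem.Dict.keys_foldl_modify ks ([] : List Int) (fun _ _ => (fun v => v ++ [1]))
        PySem.Dict.empty]
    simp [PySem.Set.update, PySem.Set.ofList, PySem.Dict.keys_empty, PySem.Set.empty]
  · intro c
    rw [hstep, PySem.Dict.getD_foldl_modify_append, pvMap_filter_pairs]
    simp

-- ===== B side =====

-- folding the merge step over any pair list concatenates matching values per key
theorem pvMergeFold_getD (ps : List (String × List Int))
    (acc : PySem.Dict String (List Int)) (c : String) :
    (ps.foldl (fun out p => out.insert p.1 (out.getD p.1 [] ++ p.2)) acc).getD c [] =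
      acc.getD c [] ++ ((ps.filter (fun p => p.1 == c)).map Prod.snd).flatten := by
  induction ps generalizing acc with
  | nil => simp
  | cons p t ih =>
    simp only [List.foldl_cons, ih, List.filter_cons]
    rw [PySem.Dict.getD_insert]
    by_cases h : p.1 = c
    · simp [h, List.append_assoc]
    · have h' : ¬ c = p.1 := fun e => h e.symm
      simp [h, h']

theorem pvFlatFilter (ks : List String) (g : String → List Int) (c : String)
    (hnd : ks.Nodup) :
    (((ks.map (fun k => (k, g k))).filter (fun p => p.1 == c)).map Prod.snd).flatten =
      if c ∈ ks then g c else [] := by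
  induction ks with
  | nil => simp
  | cons k t ih =>
    rcases List.nodup_cons.mp hnd with ⟨hk, ht⟩
    by_cases h : k = c
    · subst h
      simp [ih ht, hk]
    · simp [h, ih ht, Ne.symm h]

theorem pvMerge_inv {d1 d2 : PySem.Dict String (List Int)} {ks1 ks2 : List String}
    (h1 : pvInv d1 ks1) (h2 : pvInv d2 ks2) : pvInv (pvMerge d1 d2) (ks1 ++ ks2) := by
  constructor
  · unfold pvMerge
    rw [PySem.Dict.keys_foldl_insert_key d2.items Prod.fst _ d1, h1.1]
    have hk2 : d2.items.map Prod.fst = PySem.Set.ofList ks2 := by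
      have := h2.1; simpa [PySem.Dict.keys] using this
    rw [hk2, PySem.Set.ofList_append]
    -- update s (ofList ys) = update s ys
    rw [PySem.Set.update_eq_append_filter, PySem.Set.update_eq_append_filter,
      PySem.Set.ofList_ofList]
  · intro c
    unfold pvMerge
    rw [pvMergeFold_getD, h1.2 c]
    have hitems : d2.items = (PySem.Set.ofList ks2).map (fun k => (k, d2.getD k [])) := by
      rw [PySem.Dict.items_eq_map_keys d2 (pvInv_nodup h2) [], h2.1]
    rw [hitems, pvFlatFilter _ _ _ (PySem.Set.nodup_ofList ks2)]
    by_cases hc : c ∈ PySem.Set.ofList ks2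
    · rw [if_pos hc, h2.2 c, List.count_append, ← List.replicate_add]
    · have h0 : ks2.count c = 0 := by
        rw [List.count_eq_zero]
        intro hmem; exact hc ((PySem.Set.mem_ofList ks2 c).mpr hmem)
      rw [if_neg hc, List.count_append, h0]
      simp
  -- note: List.replicate_add : replicate (m+n) = replicate m ++ replicate n

theorem pvSingle_getD (l : List String) (d : PySem.Dict String (List Int)) (c : String) :
    (l.foldl (fun d k => d.insert k [1]) d).getD c [] =
      if c ∈ l then [1] else d.getD c [] := by
  induction l generalizing d with
  | nil => simp
  | cons k t ih =>
    simp only [List.foldl_cons, ih, List.mem_cons]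
    by_cases hct : c ∈ t
    · simp [hct]
    · rw [PySem.Dict.getD_insert]
      by_cases hck : c = k <;> simp [hck, hct]

theorem pvSingle_inv (dic : List (String × Int)) :
    pvInv ((pvKeysOf dic).foldl (fun d k => d.insert k [1]) PySem.Dict.empty) (pvKeysOf dic) := by
  constructor
  · rw [PySem.Dict.keys_foldl_insert (pvKeysOf dic) (fun _ _ => [1]) PySem.Dict.empty]
    rw [PySem.Dict.keys_empty, PySem.Set.update_nil_left]
  · intro c
    rw [pvSingle_getD]
    have hnd : (pvKeysOf dic).Nodup := by rw [pvKeysOf]; exact PySem.List.nodup_dedup _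
    by_cases hc : c ∈ pvKeysOf dic
    · rw [if_pos hc, List.count_eq_one_of_mem hnd hc]; rfl
    · rw [if_neg hc, List.count_eq_zero_of_not_mem hc]; simp

theorem pvGo_inv : ∀ dics : List (List (String × Int)),
    pvInv (pvGo dics) (dics.flatMap pvKeysOf) := by
  intro dics
  induction dics using pvGo.induct with
  | case1 =>
    rw [pvGo]
    exact ⟨by simp [PySem.Dict.keys_empty, PySem.Set.ofList], by simp [PySem.Dict.getD_empty]⟩
  | case2 dic =>
    rw [pvGo]
    simpa using pvSingle_inv dic
  | case3 d1 d2 rest ih1 ih2 =>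
    rw [pvGo]
    have h := pvMerge_inv ih1 ih2
    have hsplit : ((d1 :: d2 :: rest).take ((d1 :: d2 :: rest).length / 2)).flatMap pvKeysOf ++
        ((d1 :: d2 :: rest).drop ((d1 :: d2 :: rest).length / 2)).flatMap pvKeysOf =
        (d1 :: d2 :: rest).flatMap pvKeysOf := by
      rw [← List.flatMap_append, List.take_append_drop]
    rw [hsplit] at h
    exact h

-- ===== main equivalence =====

theorem shuffling_spec' (freq_map : List (List (List (String × Int)))) :
    shuffling freq_map = shuffling_alt freq_map := by
  unfold shuffling shuffling_alt
  have hA := pvA_inv freq_map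
  have hB := pvGo_inv (freq_map.flatMap (fun llista => llista))
  rw [List.flatMap_assoc] at hB
  exact pvInv_items_eq hA hB

-- ===== VERDICT (by name: the statement is the Claim_ definition above) =====
theorem shuffling_spec : Claim_equal_shuffling := by
  intro fm _
  unfold Spec_shuffling
  exact shuffling_spec' fm
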